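-- pv_equiv track=rewrite | github.com/wilson-taiwan/flaredown_project_public | scripts/validate_train_and_test.py | extract_id_from_json_record
-- ===== SOURCE A (Python) =====
-- from typing import Dict, Iterable, List, Optional, Set
--
-- def extract_id_from_json_record(rec: Dict) -> Optional[str]:
--     # prefer keys that look like id
--     for k in rec.keys():
--         lk = k.lower()
--         if lk in ("patient_id", "patientid", "user_id", "userid", "id", "patient"):
--             return rec.get(k)
--     # fallback: any key containing patient/user/id
--     for k in rec.keys():
--         lk = k.lower()
--         if "patient" in lk or "user" in lk or "id" in lk:
--             return rec.get(k)
--     return None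
-- ===== SOURCE B (Python) =====
-- def extract_id_from_json_record(rec):
--     found = False
--     cand = None
--     for k in rec.keys():
--         lk = k.lower()
--         if lk in ("patient_id", "patientid", "user_id", "userid", "id", "patient"):
--             return rec.get(k)
--         if not found and ("patient" in lk or "user" in lk or "id" in lk):
--             cand = rec.get(k)
--             found = True
--     return cand if found else None
-- ===== Notes on version B (the rewrite author's own statement) =====
-- stated objective: alternative
-- what changed: Replaces A's two full passes over the keys by a single pass that returns on an exact id-key immediately and records the first substring-matching key's value in a found-flag candidate.
import Mathlib
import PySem

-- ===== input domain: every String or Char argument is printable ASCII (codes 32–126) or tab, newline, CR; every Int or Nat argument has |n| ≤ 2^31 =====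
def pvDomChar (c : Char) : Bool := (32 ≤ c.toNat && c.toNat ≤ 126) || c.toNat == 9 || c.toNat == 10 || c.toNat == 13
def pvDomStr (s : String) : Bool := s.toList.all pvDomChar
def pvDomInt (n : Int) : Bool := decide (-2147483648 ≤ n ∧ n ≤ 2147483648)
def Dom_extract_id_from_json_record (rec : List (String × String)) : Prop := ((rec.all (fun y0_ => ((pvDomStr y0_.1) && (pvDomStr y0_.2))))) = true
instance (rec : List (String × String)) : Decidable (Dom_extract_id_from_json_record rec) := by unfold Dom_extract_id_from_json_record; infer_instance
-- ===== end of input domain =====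

-- B replaces A's two passes over the keys by one pass with a found-flag candidate.
-- The dict argument is modelled as PySem.Dict.ofList rec (Python's dict(): duplicate keys overwrite).

-- ===== PORT A =====
-- lk in ("patient_id", "patientid", "user_id", "userid", "id", "patient")
def pvIsPrio (lk : String) : Bool :=
  lk == "patient_id" || lk == "patientid" || lk == "user_id" || lk == "userid" || lk == "id" || lk == "patient"

-- "patient" in lk or "user" in lk or "id" in lk
def pvIsSub (lk : String) : Bool :=
  PySem.Str.isIn "patient" lk || PySem.Str.isIn "user" lk || PySem.Str.isIn "id" lk

-- first loop of A: return rec.get(k) on an exact match, else fall through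
def pvLoopPrioA (d : PySem.Dict String String) : List String → Option (Option String)
  | [] => none
  | k :: ks => if pvIsPrio (PySem.Str.lower k) then some (d.get? k) else pvLoopPrioA d ks

-- second loop of A: return rec.get(k) on a substring match, else fall through
def pvLoopSubA (d : PySem.Dict String String) : List String → Option (Option String)
  | [] => none
  | k :: ks => if pvIsSub (PySem.Str.lower k) then some (d.get? k) else pvLoopSubA d ks

def extract_id_from_json_record (rec : List (String × String)) : Option String :=
  let d := PySem.Dict.ofList rec
  match pvLoopPrioA d d.keys with
  | some r => r
  | none =>
    match pvLoopSubA d d.keys with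
    | some r => r
    | none => none

-- ===== PORT B =====
-- single pass: return immediately on an exact match; record the first substring match in cand with a found flag
def pvLoopB (d : PySem.Dict String String) : List String → Bool → Option String → Option String
  | [], found, cand => if found then cand else none
  | k :: ks, found, cand =>
    let lk := PySem.Str.lower k
    if pvIsPrio lk then d.get? k
    else if !found && pvIsSub lk then pvLoopB d ks true (d.get? k)
    else pvLoopB d ks found cand

def extract_id_from_json_record_alt (rec : List (String × String)) : Option String :=
  let d := PySem.Dict.ofList rec
  pvLoopB d d.keys false none

-- ===== PRECONDITION & SPEC =====
def Spec_extract_id_from_json_record (rec : List (String × String)) (out : Option String) : Prop := out = extract_id_from_json_record_alt rec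
instance (rec : List (String × String)) (out : Option String) : Decidable (Spec_extract_id_from_json_record rec out) := by unfold Spec_extract_id_from_json_record; infer_instance

-- ===== CLAIM (what is proved, stated in full; the proofs are below) =====
def Claim_equal_extract_id_from_json_record : Prop := ∀ (rec : List (String × String)), Dom_extract_id_from_json_record rec → Spec_extract_id_from_json_record rec (extract_id_from_json_record rec)

-- ===== LEMMAS AND PROOFS =====
-- loop invariant: B's single pass equals A's prio pass, then (if a fallback was recorded) the candidate, else A's substring pass
theorem pvLoopB_eq (d : PySem.Dict String String) (ks : List String) :
    ∀ (found : Bool) (cand : Option String),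
      pvLoopB d ks found cand =
        match pvLoopPrioA d ks with
        | some r => r
        | none =>
          if found then cand else
            match pvLoopSubA d ks with
            | some r => r
            | none => none := by
  induction ks with
  | nil => intro found cand; simp [pvLoopB, pvLoopPrioA, pvLoopSubA]
  | cons k ks ih =>
    intro found cand
    by_cases hp : pvIsPrio (PySem.Str.lower k)
    · simp [pvLoopB, pvLoopPrioA, hp]
    · by_cases hs : pvIsSub (PySem.Str.lower k)
      · cases found with
        | false => simp [pvLoopB, pvLoopPrioA, pvLoopSubA, hp, hs, ih]
        | true => simp [pvLoopB, pvLoopPrioA, hp, hs, ih]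
      · simp [pvLoopB, pvLoopPrioA, pvLoopSubA, hp, hs, ih]

-- ===== VERDICT (by name: the statement is the Claim_ definition above) =====
theorem extract_id_from_json_record_spec : Claim_equal_extract_id_from_json_record := by
  intro rec _
  unfold Spec_extract_id_from_json_record extract_id_from_json_record extract_id_from_json_record_alt
  rw [pvLoopB_eq]
  simp
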